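-- pv_equiv track=rewrite | github.com/miliar/Code_Jam_Webscraper | solutions_python/Problem_142/46.py | get_count_tuple
-- ===== SOURCE A (Python) =====
-- def get_count_tuple(s, canonical):
--     counts = []
--
--     i = 0
--     for letter in canonical:
--         count = 0
--         while i < len(s) and s[i] == letter:
--             # if char == lette?r:
--             count += 1
--             i += 1
--
--         if count == 0:
--             return None
--
--         counts.append(count)
--
--     if i != len(s):
--         return None
--
--     return tuple(counts)
-- ===== SOURCE B (Python) =====
-- def get_count_tuple(s, canonical):
--     # build the run-length encoding of s in one pass, then compare with canonical
--     runs = []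
--     for ch in s:
--         if runs and runs[-1][0] == ch:
--             runs[-1][1] += 1
--         else:
--             runs.append([ch, 1])
--     if len(runs) != len(canonical):
--         return None
--     for (ch, n), letter in zip(runs, canonical):
--         if ch != letter:
--             return None
--     return tuple(n for _, n in runs)
-- ===== Notes on version B (the rewrite author's own statement) =====
-- stated objective: alternative
-- what changed: B builds the run-length encoding of s first and then compares it to canonical by length and per-run letter, instead of A's scan threaded through canonical with an index into s.
import Mathlib
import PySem

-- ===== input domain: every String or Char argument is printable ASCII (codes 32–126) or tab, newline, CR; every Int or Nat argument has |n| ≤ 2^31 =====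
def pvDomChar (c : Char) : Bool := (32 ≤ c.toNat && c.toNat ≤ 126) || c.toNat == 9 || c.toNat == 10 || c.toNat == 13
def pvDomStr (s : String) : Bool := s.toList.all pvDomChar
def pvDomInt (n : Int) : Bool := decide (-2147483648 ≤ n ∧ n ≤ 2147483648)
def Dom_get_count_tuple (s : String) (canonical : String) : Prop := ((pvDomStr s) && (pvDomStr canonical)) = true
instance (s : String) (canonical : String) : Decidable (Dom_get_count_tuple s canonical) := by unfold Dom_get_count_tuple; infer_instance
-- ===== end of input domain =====

-- B re-implements A by a different decomposition (run-length encode s, then compare with canonical); equal return value proved on all inputs.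

-- ===== PORT A =====
-- inner 'while i < len(s) and s[i] == letter': counts the matching prefix of the
-- remaining suffix of s (the suffix stands for the index i; exact, since i only moves forward)
def pvRunA : Char → List Char → Int × List Char
  | _, [] => (0, [])
  | letter, c :: t =>
    if c = letter then
      let p := pvRunA letter t
      (p.1 + 1, p.2)
    else (0, c :: t)

-- 'for letter in canonical' with the final 'if i != len(s)' check in the base case
def pvLoopA : List Char → List Char → Option (List Int)
  | [], rest => if rest = [] then some [] else none
  | letter :: cs, rest =>
    let p := pvRunA letter rest
    if p.1 = 0 then none
    else (pvLoopA cs p.2).map (fun counts => p.1 :: counts)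

def get_count_tuple (s : String) (canonical : String) : Option (List Int) :=
  pvLoopA canonical.toList s.toList

-- ===== PORT B =====
-- the 'for ch in s' loop of Source B: acc is the runs list built so far, in reverse
def pvRunsB : List Char → List (Char × Int) → List (Char × Int)
  | [], acc => acc.reverse
  | c :: t, acc =>
    match acc with
    | (d, n) :: rest => if d = c then pvRunsB t ((d, n + 1) :: rest) else pvRunsB t ((c, 1) :: (d, n) :: rest)
    | [] => pvRunsB t [(c, 1)]

def get_count_tuple_alt (s : String) (canonical : String) : Option (List Int) :=
  let runs := pvRunsB s.toList []
  if runs.length = canonical.toList.length then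
    if (runs.zip canonical.toList).all (fun p => p.1.1 == p.2) then
      some (runs.map Prod.snd)
    else none
  else none

-- ===== PRECONDITION & SPEC =====
def Spec_get_count_tuple (s : String) (canonical : String) (out : Option (List Int)) : Prop := out = get_count_tuple_alt s canonical
instance (s : String) (canonical : String) (out : Option (List Int)) : Decidable (Spec_get_count_tuple s canonical out) := by unfold Spec_get_count_tuple; infer_instance

-- ===== CLAIM (what is proved, stated in full; the proofs are below) =====
def Claim_equal_get_count_tuple : Prop := ∀ (s : String) (canonical : String), Dom_get_count_tuple s canonical → Spec_get_count_tuple s canonical (get_count_tuple s canonical)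

-- ===== LEMMAS AND PROOFS =====

-- proof-side run-length encoding, built from the right
def pvConsRun (c : Char) (n : Int) : List (Char × Int) → List (Char × Int)
  | (d, m) :: t => if d = c then (d, n + m) :: t else (c, n) :: (d, m) :: t
  | [] => [(c, n)]

def pvRuns : List Char → List (Char × Int)
  | [] => []
  | c :: t => pvConsRun c 1 (pvRuns t)

-- proof-side recursive comparison of canonical against a runs list
def pvCheck : List Char → List (Char × Int) → Option (List Int)
  | [], [] => some []
  | [], _ :: _ => none
  | _ :: _, [] => none
  | l :: cs, (d, n) :: rs => if d = l then (pvCheck cs rs).map (fun counts => n :: counts) else none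

theorem pvRuns_head_fst (c : Char) (t : List Char) :
    ∃ n rs, pvRuns (c :: t) = (c, n) :: rs := by
  show ∃ n rs, pvConsRun c 1 (pvRuns t) = (c, n) :: rs
  cases h : pvRuns t with
  | nil => exact ⟨1, [], rfl⟩
  | cons p rest =>
    obtain ⟨d, m⟩ := p
    by_cases hdc : d = c
    · subst hdc; exact ⟨1 + m, rest, by simp [pvConsRun]⟩
    · exact ⟨1, (d, m) :: rest, by simp [pvConsRun, hdc]⟩

theorem pvRunA_nonneg (l : Char) (xs : List Char) : 0 ≤ (pvRunA l xs).1 := by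
  induction xs with
  | nil => simp [pvRunA]
  | cons c t ih =>
    by_cases h : c = l
    · simp only [pvRunA, if_pos h]; omega
    · simp [pvRunA, h]

theorem pvRunA_len (l : Char) (xs : List Char) : (pvRunA l xs).2.length ≤ xs.length := by
  induction xs with
  | nil => simp [pvRunA]
  | cons c t ih =>
    by_cases h : c = l
    · simp only [pvRunA, if_pos h]; exact Nat.le_succ_of_le ih
    · simp [pvRunA, h]

theorem pvRun_split : ∀ (t : List Char) (c : Char),
    pvRuns (c :: t) = (c, (pvRunA c (c :: t)).1) :: pvRuns (pvRunA c (c :: t)).2 := by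
  intro t
  induction t with
  | nil => intro c; simp [pvRuns, pvRunA, pvConsRun]
  | cons d t' ih =>
    intro c
    by_cases hcd : d = c
    · subst hcd
      have h1 : pvRunA d (d :: d :: t') = ((pvRunA d (d :: t')).1 + 1, (pvRunA d (d :: t')).2) := by
        simp [pvRunA]
      have h2 := ih d
      show pvConsRun d 1 (pvRuns (d :: t')) = _
      rw [h2, h1]
      simp [pvConsRun]
      omega
    · have h1 : pvRunA c (c :: d :: t') = (1, d :: t') := by
        simp [pvRunA, hcd]
      obtain ⟨n, rs, hr⟩ := pvRuns_head_fst d t'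
      show pvConsRun c 1 (pvRuns (d :: t')) = _
      rw [hr, h1]
      simp [pvConsRun, hcd]
      rw [← hr]

theorem pvRuns_nil_iff (xs : List Char) : pvRuns xs = [] ↔ xs = [] := by
  cases xs with
  | nil => simp [pvRuns]
  | cons c t =>
    obtain ⟨n, rs, hr⟩ := pvRuns_head_fst c t
    simp [hr]

-- A's loop equals the recursive comparison against the run-length encoding
theorem pvLoopA_eq_check : ∀ (N : ℕ) (rest : List Char), rest.length ≤ N →
    ∀ canonical, pvLoopA canonical rest = pvCheck canonical (pvRuns rest) := by
  intro N
  induction N with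
  | zero =>
    intro rest hlen canonical
    have : rest = [] := by cases rest <;> simp_all
    subst this
    cases canonical with
    | nil => simp [pvLoopA, pvRuns, pvCheck]
    | cons l cs => simp [pvLoopA, pvRunA, pvRuns, pvCheck]
  | succ N ih =>
    intro rest hlen canonical
    cases canonical with
    | nil =>
      cases h : pvRuns rest with
      | nil =>
        have : rest = [] := (pvRuns_nil_iff rest).mp h
        simp [this, pvLoopA, pvCheck]
      | cons p rs =>
        have : rest ≠ [] := by
          intro hr; rw [hr] at h; simp [pvRuns] at h
        simp [pvLoopA, this, pvCheck]
    | cons l cs =>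
      cases rest with
      | nil => simp [pvLoopA, pvRunA, pvRuns, pvCheck]
      | cons c t =>
        by_cases hcl : c = l
        · subst hcl
          have hsplit := pvRun_split t c
          have he : pvRunA c (c :: t) = ((pvRunA c t).1 + 1, (pvRunA c t).2) := by
            simp [pvRunA]
          have hpos : (pvRunA c (c :: t)).1 ≠ 0 := by
            have := pvRunA_nonneg c t
            rw [he]; omega
          have hlen2 : (pvRunA c (c :: t)).2.length ≤ N := by
            have h1 := pvRunA_len c t
            have h2 : (pvRunA c (c :: t)).2 = (pvRunA c t).2 := by rw [he]
            rw [h2]; simp at hlen; omega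
          rw [hsplit]
          simp only [pvLoopA, pvCheck, if_neg hpos]
          rw [ih _ hlen2 cs]
          simp
        · have h1 : pvRunA l (c :: t) = (0, c :: t) := by simp [pvRunA, hcl]
          obtain ⟨n, rs, hr⟩ := pvRuns_head_fst c t
          rw [hr]
          simp [pvLoopA, pvCheck, h1, hcl]

-- B's length/zip/all comparison equals the recursive comparison
theorem pvCheck_eq_zip : ∀ (canonical : List Char) (runs : List (Char × Int)),
    pvCheck canonical runs =
      (if runs.length = canonical.length then
        (if (runs.zip canonical).all (fun p => p.1.1 == p.2) then some (runs.map Prod.snd) else none)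
      else none) := by
  intro canonical
  induction canonical with
  | nil =>
    intro runs
    cases runs with
    | nil => simp [pvCheck]
    | cons p rs => simp [pvCheck]
  | cons l cs ih =>
    intro runs
    cases runs with
    | nil => simp [pvCheck]
    | cons p rs =>
      obtain ⟨d, n⟩ := p
      simp only [pvCheck, List.zip_cons_cons, List.all_cons, List.length_cons]
      rw [ih rs]
      by_cases hdl : d = l
      · subst hdl
        by_cases hlen : rs.length = cs.length
        · by_cases hall : (rs.zip cs).all (fun p => p.1.1 == p.2)
          · simp [hlen, hall]
          · simp [hlen, hall]
        · simp [hlen]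
      · simp [hdl]

-- B's accumulator loop computes the right-built run-length encoding
theorem pvRunsB_acc : ∀ (xs : List Char) (d : Char) (n : Int) (rest : List (Char × Int)),
    pvRunsB xs ((d, n) :: rest) = rest.reverse ++ pvConsRun d n (pvRuns xs) := by
  intro xs
  induction xs with
  | nil => intro d n rest; simp [pvRunsB, pvRuns, pvConsRun]
  | cons c t ih =>
    intro d n rest
    by_cases hdc : d = c
    · subst hdc
      simp only [pvRunsB]
      rw [ih]
      simp only [pvRuns]

      cases h : pvRuns t with
      | nil => simp [pvConsRun]
      | cons p rs =>
        obtain ⟨e, m⟩ := p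
        by_cases hed : e = d
        · subst hed
          simp [pvConsRun]
          try omega
        · simp [pvConsRun, hed]
    · have hcd : ¬ c = d := fun h => hdc h.symm
      simp only [pvRunsB, if_neg hdc]
      rw [ih]
      simp only [pvRuns]
      have hhead : pvConsRun d n (pvConsRun c 1 (pvRuns t)) = (d, n) :: pvConsRun c 1 (pvRuns t) := by
        cases h : pvRuns t with
        | nil => simp [pvConsRun, hcd]
        | cons p rs =>
          obtain ⟨e, m⟩ := p
          by_cases hec : e = c
          · subst hec; simp [pvConsRun, hcd]
          · simp [pvConsRun, hec, hcd]
      rw [hhead]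
      simp

theorem pvRunsB_eq (xs : List Char) : pvRunsB xs [] = pvRuns xs := by
  cases xs with
  | nil => simp [pvRunsB, pvRuns]
  | cons c t =>
    show pvRunsB t [(c, 1)] = _
    rw [pvRunsB_acc]
    simp [pvRuns]

-- ===== VERDICT (by name: the statement is the Claim_ definition above) =====
theorem get_count_tuple_spec : Claim_equal_get_count_tuple := by
  intro s canonical _
  show pvLoopA canonical.toList s.toList = get_count_tuple_alt s canonical
  unfold get_count_tuple_alt
  rw [pvRunsB_eq, ← pvCheck_eq_zip]
  exact pvLoopA_eq_check s.toList.length s.toList le_rfl canonical.toList
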